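-- pv_equiv track=rewrite | github.com/chaosnabilera/problemsolving | leetcode/1088.py | to_base_5
-- ===== SOURCE A (Python) =====
-- def to_base_5(num):
-- 	num = list(str(num))
-- 	k = 0
-- 	bsum = 0
-- 	ston = {'0':0,'1':1,'6':2,'8':3,'9':4}
-- 	for i in range(len(num)-1,-1,-1):
-- 		bsum += ston[num[i]] * (5**k)
-- 		k += 1
-- 	return bsum
-- ===== SOURCE B (Python) =====
-- def to_base_5(num):
--     ston = {'0': 0, '1': 1, '6': 2, '8': 3, '9': 4}
--     bsum = 0
--     for c in str(num):
--         bsum = bsum * 5 + ston[c]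
--     return bsum
-- ===== Notes on version B (the rewrite author's own statement) =====
-- stated objective: simpler
-- what changed: Replaces the reverse index loop that maintains an explicit power counter k and computes ston[digit]*5**k per digit with a single left-to-right Horner pass (bsum = bsum*5 + ston[c]) over str(num), with no indexing and no exponentiation.
-- outside the precondition, e.g. on to_base_5(5): A raises KeyError, B raises KeyError; on to_base_5(-16): A raises KeyError, B raises KeyError
import Mathlib
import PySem

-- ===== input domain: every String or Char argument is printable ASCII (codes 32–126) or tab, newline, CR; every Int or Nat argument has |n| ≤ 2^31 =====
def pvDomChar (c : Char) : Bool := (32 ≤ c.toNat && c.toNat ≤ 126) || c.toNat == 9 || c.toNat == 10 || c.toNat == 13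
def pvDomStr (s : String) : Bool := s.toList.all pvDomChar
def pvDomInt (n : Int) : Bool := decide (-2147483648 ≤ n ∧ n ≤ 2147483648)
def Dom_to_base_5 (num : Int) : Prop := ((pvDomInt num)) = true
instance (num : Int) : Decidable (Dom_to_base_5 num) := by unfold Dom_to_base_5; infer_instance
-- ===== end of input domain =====

-- B replaces A's reverse index loop with power counter by a left-to-right Horner pass: simpler.

-- ===== PORT A =====
-- the ston mapping dict; lookups use default 0, reached only outside Pre_ (Python raises KeyError there)
def ston : PySem.Dict Char Int :=
  PySem.Dict.ofList [('0', 0), ('1', 1), ('6', 2), ('8', 3), ('9', 4)]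

def to_base_5 (num : Int) : Int :=
  let numL := (PySem.Int.toStr num).toList
  let st :=
    (PySem.List.pyRange ((numL.length : Int) - 1) (-1) (-1)).foldl
      (fun (st : Int × Int) i =>
        (st.1 + 1, st.2 + ston.getD (PySem.List.pyGetD numL i ' ') 0 * 5 ^ st.1.toNat))
      (0, 0)
  st.2

-- ===== PORT B =====
def to_base_5_alt (num : Int) : Int :=
  (PySem.Int.toStr num).toList.foldl (fun bsum c => bsum * 5 + ston.getD c 0) 0

-- ===== PRECONDITION & SPEC =====
-- Pre_ excludes inputs where Python A (and B) raise KeyError: any character of str(num)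
-- outside the mapping, i.e. negatives ('-') and digits other than 0,1,6,8,9.
def Pre_to_base_5 (num : Int) : Prop :=
  ((PySem.Int.toStr num).toList.all
    (fun c => c ∈ (['0', '1', '6', '8', '9'] : List Char))) = true
instance (num : Int) : Decidable (Pre_to_base_5 num) := by unfold Pre_to_base_5; infer_instance
def pvWitness_to_base_5 : Int := 1896
def Spec_to_base_5 (num : Int) (out : Int) : Prop := out = to_base_5_alt num
instance (num : Int) (out : Int) : Decidable (Spec_to_base_5 num out) := by unfold Spec_to_base_5; infer_instance

-- ===== CLAIM (what is proved, stated in full; the proofs are below) =====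
def Claim_equal_to_base_5 : Prop :=
  ∀ (num : Int), Dom_to_base_5 num → Pre_to_base_5 num → Spec_to_base_5 num (to_base_5 num)

-- ===== LEMMAS AND PROOFS =====

-- Horner on xs ++ [c]
theorem horner_concat (xs : List Char) (c : Char) :
    (xs ++ [c]).foldl (fun bsum c => bsum * 5 + ston.getD c 0) 0
      = xs.foldl (fun bsum c => bsum * 5 + ston.getD c 0) 0 * 5 + ston.getD c 0 := by
  simp [List.foldl_append]

-- A's state fold over a reversed digit list, generalized over the starting state
theorem afold_eq (l : List Char) :
    ∀ (k bsum : Int), 0 ≤ k →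
      (l.foldl (fun (st : Int × Int) c =>
          (st.1 + 1, st.2 + ston.getD c 0 * 5 ^ st.1.toNat)) (k, bsum)).2
        = bsum + l.reverse.foldl (fun bsum c => bsum * 5 + ston.getD c 0) 0 * 5 ^ k.toNat := by
  induction l with
  | nil => intro k bsum _; simp
  | cons c t ih =>
      intro k bsum hk
      have hk1 : (k + 1).toNat = k.toNat + 1 := by omega
      simp only [List.foldl_cons, List.reverse_cons]
      rw [ih (k + 1) _ (by omega), horner_concat, hk1]
      ring

-- the indices A visits, mapped through pyGetD, are exactly l.reverse
theorem idx_map (l : List Char) :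
    (PySem.List.pyRange ((l.length : Int) - 1) (-1) (-1)).map
        (fun i => PySem.List.pyGetD l i ' ') = l.reverse := by
  rw [PySem.List.pyRange_neg_one_eq_reverse]
  have h0 : (-1 : Int) + 1 = 0 := by ring
  have h1 : ((l.length : Int) - 1) + 1 = (l.length : Int) := by ring
  rw [h0, h1, List.map_reverse, PySem.List.map_pyGetD_pyRange_zero']

-- ===== VERDICT (by name: the statement is the Claim_ definition above) =====
theorem to_base_5_spec : Claim_equal_to_base_5 := by
  intro num _ _
  unfold Spec_to_base_5 to_base_5 to_base_5_alt
  set l := (PySem.Int.toStr num).toList with hl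
  calc ((PySem.List.pyRange ((l.length : Int) - 1) (-1) (-1)).foldl
          (fun (st : Int × Int) i =>
            (st.1 + 1, st.2 + ston.getD (PySem.List.pyGetD l i ' ') 0 * 5 ^ st.1.toNat))
          (0, 0)).2
      = (((PySem.List.pyRange ((l.length : Int) - 1) (-1) (-1)).map
            (fun i => PySem.List.pyGetD l i ' ')).foldl
          (fun (st : Int × Int) c =>
            (st.1 + 1, st.2 + ston.getD c 0 * 5 ^ st.1.toNat)) (0, 0)).2 := by
        rw [List.foldl_map]
    _ = (l.reverse.foldl (fun (st : Int × Int) c =>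
            (st.1 + 1, st.2 + ston.getD c 0 * 5 ^ st.1.toNat)) (0, 0)).2 := by rw [idx_map]
    _ = l.foldl (fun bsum c => bsum * 5 + ston.getD c 0) 0 := by
        rw [afold_eq l.reverse 0 0 le_rfl]; simp
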